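-- pv_equiv track=rewrite | github.com/fadhillaxl/flatsat | pluto-tools/lib/framing.py | manchester_decode
-- ===== SOURCE A (Python) =====
-- def manchester_decode(bits):
--     """
--     Decodes Manchester encoded bits.
--     Expects aligned bits.
--     01 -> 0
--     10 -> 1
--     Returns list of decoded bits (0.5x length)
--     """
--     decoded = []
--     # Process in pairs
--     for i in range(0, len(bits)-1, 2):
--         pair = (bits[i], bits[i+1])
--         if pair == (0, 1):
--             decoded.append(0)
--         elif pair == (1, 0):
--             decoded.append(1)
--         else:
--             # Error (00 or 11) - valid Manchester must transition
--             # For simplicity, we can guess or mark error.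
--             # Here we just treat 11 as 1 and 00 as 0 (effectively NRZ fallback)
--             # or better, skip/abort. Let's append the first bit as fallback.
--             decoded.append(bits[i])
--     return decoded
-- ===== SOURCE B (Python) =====
-- def manchester_decode(bits):
--     """Every branch of the pairwise decoder appends exactly bits[i] (01->0=bits[i],
--     10->1=bits[i], fallback->bits[i]), so decoding is just the even-indexed
--     elements below len(bits)-1: one slice, no loop, no branching."""
--     return list(bits[0:len(bits) - 1:2])
-- ===== Notes on version B (the rewrite author's own statement) =====
-- stated objective: simpler
-- what changed: Replaced the pairwise branching loop by a single extended slice bits[0:len(bits)-1:2], after observing every branch (including the fallback) appends exactly bits[i].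
import Mathlib
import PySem

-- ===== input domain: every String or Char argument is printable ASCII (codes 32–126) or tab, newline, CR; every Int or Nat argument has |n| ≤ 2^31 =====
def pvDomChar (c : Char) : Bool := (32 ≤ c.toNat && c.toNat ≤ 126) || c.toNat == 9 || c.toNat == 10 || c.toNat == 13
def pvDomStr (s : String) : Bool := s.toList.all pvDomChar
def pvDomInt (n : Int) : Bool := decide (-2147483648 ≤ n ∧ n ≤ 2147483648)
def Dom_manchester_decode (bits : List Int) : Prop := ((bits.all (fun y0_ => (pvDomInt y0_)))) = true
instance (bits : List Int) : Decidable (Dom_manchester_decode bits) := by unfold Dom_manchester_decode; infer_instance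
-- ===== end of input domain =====

-- B replaces A's branching pairwise loop by one step-2 slice (every branch of A appends exactly bits[i]); objective: simpler.

-- ===== PORT A =====
def manchester_decode (bits : List Int) : List Int :=
  (PySem.List.pyRange 0 ((bits.length : Int) - 1) 2).foldl
    (fun decoded i =>
      let pair := (PySem.List.pyGetD bits i 0, PySem.List.pyGetD bits (i+1) 0)
      if pair = ((0:Int), (1:Int)) then decoded ++ [(0:Int)]
      else if pair = ((1:Int), (0:Int)) then decoded ++ [(1:Int)]
      else decoded ++ [PySem.List.pyGetD bits i 0])
    []
-- pyGetD is exact here: every index the loop reads (i and i+1 for i in range(0, len-1, 2)) is in range.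

-- ===== PORT B =====
def manchester_decode_alt (bits : List Int) : List Int :=
  (PySem.List.slice? bits (some 0) (some ((bits.length : Int) - 1)) 2).getD []
-- step 2 ≠ 0, so slice? always returns some; .getD [] only unwraps.

-- ===== PRECONDITION & SPEC =====
def Spec_manchester_decode (bits : List Int) (out : List Int) : Prop := out = manchester_decode_alt bits
instance (bits : List Int) (out : List Int) : Decidable (Spec_manchester_decode bits out) := by unfold Spec_manchester_decode; infer_instance

-- ===== CLAIM (what is proved, stated in full; the proofs are below) =====
def Claim_equal_manchester_decode : Prop := ∀ (bits : List Int), Dom_manchester_decode bits → Spec_manchester_decode bits (manchester_decode bits)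

-- ===== LEMMAS AND PROOFS =====

-- Every branch of A's loop body appends exactly bits[i].
theorem manchester_decode_eq_map (bits : List Int) :
    manchester_decode bits
      = (PySem.List.pyRange 0 ((bits.length : Int) - 1) 2).map
          (fun i => PySem.List.pyGetD bits i 0) := by
  unfold manchester_decode
  have hf : (fun (decoded : List Int) (i : Int) =>
      let pair := (PySem.List.pyGetD bits i 0, PySem.List.pyGetD bits (i+1) 0)
      if pair = ((0:Int), (1:Int)) then decoded ++ [(0:Int)]
      else if pair = ((1:Int), (0:Int)) then decoded ++ [(1:Int)]
      else decoded ++ [PySem.List.pyGetD bits i 0])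
      = fun decoded i => decoded ++ [PySem.List.pyGetD bits i 0] := by
    funext decoded i
    simp only []
    split_ifs with h1 h2
    · simp_all
    · simp_all
    · rfl
  rw [hf, PySem.List.foldl_append_singleton_eq_map]
  simp

-- The even-indexed map below len-1 is exactly the step-2 slice.
theorem map_eq_alt (bits : List Int) :
    (PySem.List.pyRange 0 ((bits.length : Int) - 1) 2).map
          (fun i => PySem.List.pyGetD bits i 0)
      = manchester_decode_alt bits := by
  unfold manchester_decode_alt
  rcases bits with _ | ⟨a, t⟩
  · decide
  · set bs := a :: t with hbs
    have hn : 1 ≤ bs.length := by simp [hbs]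
    rw [PySem.List.pyRange_of_pos 0 ((bs.length : Int) - 1) (by norm_num)]
    simp only [PySem.List.slice?, PySem.List.sliceIndices]
    norm_num
    have hne : bs ≠ [] := by simp [hbs]
    simp only [if_neg hne]
    have hcount : (if (0:Int) < (bs.length:Int) - 1 then (((bs.length:Int) - 1 + 2 - 1) / 2).toNat else 0)
        = (if 1 < bs.length then (((bs.length:Int) - 1 + 2 - 1) / 2).toNat else 0) := by
      by_cases h : 1 < bs.length
      · rw [if_pos h, if_pos (by omega)]
      · rw [if_neg h, if_neg (by omega)]
    rw [hcount]
    rw [← List.filterMap_eq_map]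
    apply List.filterMap_congr
    intro k hk
    have hk' : 2 * k < bs.length := by
      rcases Nat.lt_or_ge 1 bs.length with h | h
      · rw [List.mem_range, if_pos h] at hk
        omega
      · rw [List.mem_range, if_neg (by omega)] at hk
        omega
    have hcast : (2 * (k:Int)) = ((2 * k : Nat) : Int) := by push_cast; ring
    simp only [Function.comp, hcast, PySem.List.pyGetD_natCast,
      Int.toNat_natCast, List.getElem?_eq_getElem hk', List.getD_eq_getElem _ _ hk']

-- ===== VERDICT (by name: the statement is the Claim_ definition above) =====
theorem manchester_decode_spec : Claim_equal_manchester_decode := by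
  intro bits _
  unfold Spec_manchester_decode
  rw [manchester_decode_eq_map, map_eq_alt]
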